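-- pv_equiv track=rewrite | github.com/PolyhedraTech/m-n-CAk-examples | Wildfire_on_R.py | remove_interior_points
-- ===== SOURCE A (Python) =====
-- def remove_interior_points(points):
--     """
--     Removes interior points from a list of points.
--     A point is considered interior if there are points above, below,
--     to the left, and to the right of it.
--     Args:
--         points (list of tuple): A list of points where each point is represented
--                                 as a tuple (x, y).
--     Returns:
--         list of tuple: A list of points with all interior points removed.
--     """
--     def is_interior(point, points_set):
--         x, y = point
--         above = below = left = right = False
--         for px, py in points_set:
--             if px == x and py > y:
--                 above = True
--             elif px == x and py < y:
--                 below = True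
--             elif py == y and px > x:
--                 right = True
--             elif py == y and px < x:
--                 left = True
--             if above and below and left and right:
--                 return True
--         return False
--
--     points_set = set(points)
--     result = [point for point in points if not is_interior(point, points_set)]
--     return result
-- ===== SOURCE B (Python) =====
-- def remove_interior_points(points):
--     """
--     Removes interior points from a list of points.
--     A point is interior iff its column (same x) contains a strictly smaller
--     and a strictly larger y, and its row (same y) contains a strictly smaller
--     and a strictly larger x.  One pass builds per-column y-extents and
--     per-row x-extents; each point is then tested in O(1).
--     """
--     col = {}  # x -> (min y, max y) over points in that column
--     row = {}  # y -> (min x, max x) over points in that row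
--     for x, y in points:
--         c = col.get(x)
--         col[x] = (y, y) if c is None else (min(c[0], y), max(c[1], y))
--         r = row.get(y)
--         row[y] = (x, x) if r is None else (min(r[0], x), max(r[1], x))
--     result = []
--     for x, y in points:
--         cmn, cmx = col[x]
--         rmn, rmx = row[y]
--         if not (cmn < y < cmx and rmn < x < rmx):
--             result.append((x, y))
--     return result
-- ===== Notes on version B (the rewrite author's own statement) =====
-- stated objective: faster
-- what changed: Replaces the per-point scan of the whole point set with one pass that records per-column min/max y and per-row min/max x, so each point's interior test becomes O(1) dict lookups.
import Mathlib
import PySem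

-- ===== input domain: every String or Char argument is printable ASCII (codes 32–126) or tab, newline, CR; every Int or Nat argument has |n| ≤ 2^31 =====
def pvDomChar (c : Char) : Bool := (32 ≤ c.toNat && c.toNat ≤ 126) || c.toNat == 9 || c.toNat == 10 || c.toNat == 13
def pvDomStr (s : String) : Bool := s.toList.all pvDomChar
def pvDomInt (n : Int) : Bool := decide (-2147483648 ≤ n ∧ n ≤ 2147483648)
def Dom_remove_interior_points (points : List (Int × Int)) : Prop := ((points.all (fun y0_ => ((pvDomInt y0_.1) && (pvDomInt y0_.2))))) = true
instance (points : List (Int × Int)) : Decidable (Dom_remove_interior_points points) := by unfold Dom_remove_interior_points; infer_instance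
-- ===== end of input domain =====

-- B replaces A's per-point scan of the whole set by one pass recording per-column
-- min/max y and per-row min/max x, making each point's interior test O(1).

-- ===== PORT A =====
-- is_interior's loop: four flags, elif chain, early return once all four are set
def piIsInterior (x y : Int) : List (Int × Int) → Bool → Bool → Bool → Bool → Bool
  | [], _, _, _, _ => false
  | (px, py) :: rest, above, below, left, right =>
    let s : Bool × Bool × Bool × Bool :=
      if px == x && py > y then (true, below, left, right)
      else if px == x && py < y then (above, true, left, right)
      else if py == y && px > x then (above, below, left, true)
      else if py == y && px < x then (above, below, true, right)
      else (above, below, left, right)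
    if s.1 && s.2.1 && s.2.2.1 && s.2.2.2 then true
    else piIsInterior x y rest s.1 s.2.1 s.2.2.1 s.2.2.2

def remove_interior_points (points : List (Int × Int)) : List (Int × Int) :=
  let points_set := PySem.Set.ofList points
  points.filter (fun p => !(piIsInterior p.1 p.2 points_set false false false false))

-- ===== PORT B =====
-- dict update `d[k] = (v,v) if d.get(k) is None else (min .., max ..)`
def piUpd (d : PySem.Dict Int (Int × Int)) (k v : Int) : PySem.Dict Int (Int × Int) :=
  match d.get? k with
  | none => d.insert k (v, v)
  | some (mn, mx) => d.insert k (min mn v, max mx v)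

-- Python's `col[x]` / `row[y]` cannot KeyError (every key was inserted in the first
-- loop); ported as get? with an unreachable none branch on which the point is kept.
def remove_interior_points_alt (points : List (Int × Int)) : List (Int × Int) :=
  let cr := points.foldl
    (fun (cr : PySem.Dict Int (Int × Int) × PySem.Dict Int (Int × Int)) p =>
      (piUpd cr.1 p.1 p.2, piUpd cr.2 p.2 p.1))
    (PySem.Dict.empty, PySem.Dict.empty)
  points.filter (fun p =>
    !(match cr.1.get? p.1, cr.2.get? p.2 with
      | some (cmn, cmx), some (rmn, rmx) =>
        cmn < p.2 && p.2 < cmx && rmn < p.1 && p.1 < rmx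
      | _, _ => false))

-- ===== PRECONDITION & SPEC =====
def Spec_remove_interior_points (points : List (Int × Int)) (out : List (Int × Int)) : Prop := out = remove_interior_points_alt points
instance (points : List (Int × Int)) (out : List (Int × Int)) : Decidable (Spec_remove_interior_points points out) := by unfold Spec_remove_interior_points; infer_instance

-- ===== CLAIM (what is proved, stated in full; the proofs are below) =====
def Claim_equal_remove_interior_points : Prop := ∀ (points : List (Int × Int)), Dom_remove_interior_points points → Spec_remove_interior_points points (remove_interior_points points)

-- ===== LEMMAS AND PROOFS =====

-- the four scan conditions of A's loop, named so rewriting keeps their shape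
def piCA (x y : Int) (p : Int × Int) : Bool := p.1 == x && p.2 > y
def piCB (x y : Int) (p : Int × Int) : Bool := p.1 == x && p.2 < y
def piCL (x y : Int) (p : Int × Int) : Bool := p.2 == y && p.1 < x
def piCR (x y : Int) (p : Int × Int) : Bool := p.2 == y && p.1 > x

-- the elif chain acts like four independent ||-updates (the conditions are mutually exclusive)
theorem piStep_eq (px py x y : Int) (a b l r : Bool) :
    (if px == x && py > y then (true, b, l, r)
     else if px == x && py < y then (a, true, l, r)
     else if py == y && px > x then (a, b, l, true)
     else if py == y && px < x then (a, b, true, r)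
     else (a, b, l, r) : Bool × Bool × Bool × Bool)
    = (a || piCA x y (px, py), b || piCB x y (px, py),
       l || piCL x y (px, py), r || piCR x y (px, py)) := by
  unfold piCA piCB piCL piCR
  rcases lt_trichotomy px x with h' | h' | h' <;>
    rcases lt_trichotomy py y with h | h | h <;>
    subst_vars <;>
    simp_all [ne_of_lt, ne_of_gt, lt_asymm]

theorem piIsInterior_eq (x y : Int) (l : List (Int × Int)) :
    ∀ (a b le r : Bool), (a && b && le && r) = false →
    piIsInterior x y l a b le r =
      ((a || l.any (piCA x y)) && (b || l.any (piCB x y)) &&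
       (le || l.any (piCL x y)) && (r || l.any (piCR x y))) := by
  induction l with
  | nil =>
    intro a b le r h
    simp only [piIsInterior, List.any_nil, Bool.or_false]
    exact h.symm
  | cons p rest ih =>
    intro a b le r h
    obtain ⟨px, py⟩ := p
    rw [piIsInterior, piStep_eq]
    simp only [List.any_cons]
    by_cases hc : ((a || piCA x y (px, py)) && (b || piCB x y (px, py)) &&
        (le || piCL x y (px, py)) && (r || piCR x y (px, py))) = true
    · rw [if_pos hc]
      simp only [Bool.and_eq_true, Bool.or_eq_true] at hc
      rcases hc with ⟨⟨⟨h1, h2⟩, h3⟩, h4⟩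
      symm
      simp only [Bool.and_eq_true, Bool.or_eq_true]
      exact ⟨⟨⟨by tauto, by tauto⟩, by tauto⟩, by tauto⟩
    · rw [if_neg hc]
      rw [ih _ _ _ _ (Bool.not_eq_true _ ▸ eq_false_of_ne_true hc)]
      simp only [Bool.or_assoc]

-- foldl over the pair of dicts = pair of foldls
theorem piFold_pair (l : List (Int × Int))
    (c r : PySem.Dict Int (Int × Int)) :
    l.foldl (fun (cr : PySem.Dict Int (Int × Int) × PySem.Dict Int (Int × Int)) p =>
      (piUpd cr.1 p.1 p.2, piUpd cr.2 p.2 p.1)) (c, r)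
    = (l.foldl (fun d p => piUpd d p.1 p.2) c,
       l.foldl (fun d p => piUpd d p.2 p.1) r) := by
  induction l generalizing c r with
  | nil => rfl
  | cons p rest ih => simp [List.foldl_cons, ih]

-- min/max accumulator over a value list
def piMM : Option (Int × Int) → List Int → Option (Int × Int)
  | o, [] => o
  | none, v :: vs => piMM (some (v, v)) vs
  | some (mn, mx), v :: vs => piMM (some (min mn v, max mx v)) vs

theorem piFold_get (k v : Int × Int → Int) (l : List (Int × Int))
    (d : PySem.Dict Int (Int × Int)) (x : Int) :
    (l.foldl (fun d p => piUpd d (k p) (v p)) d).get? x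
    = piMM (d.get? x) ((l.filter (fun p => k p == x)).map v) := by
  induction l generalizing d with
  | nil => rfl
  | cons p rest ih =>
    rw [List.foldl_cons, ih]
    by_cases hk : k p = x
    · subst hk
      simp only [List.filter_cons, beq_self_eq_true, if_pos, List.map_cons]
      unfold piUpd
      cases hg : d.get? (k p) with
      | none => rw [PySem.Dict.get?_insert_self]; rfl
      | some mm => obtain ⟨mn, mx⟩ := mm; rw [PySem.Dict.get?_insert_self]; rfl
    · have hfil : (p :: rest).filter (fun p => k p == x) = rest.filter (fun p => k p == x) := by
        simp [hk]
      rw [hfil]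
      have hget : (piUpd d (k p) (v p)).get? x = d.get? x := by
        unfold piUpd
        cases d.get? (k p) with
        | none => exact PySem.Dict.get?_insert_of_ne _ _ (fun h => hk h.symm)
        | some mm => obtain ⟨mn, mx⟩ := mm
                     exact PySem.Dict.get?_insert_of_ne _ _ (fun h => hk h.symm)
      rw [hget]

theorem piMM_some (vs : List Int) : ∀ (mn mx : Int),
    piMM (some (mn, mx)) vs = some (vs.foldl min mn, vs.foldl max mx) := by
  induction vs with
  | nil => intro mn mx; rfl
  | cons v vs ih => intro mn mx; rw [piMM, ih, List.foldl_cons, List.foldl_cons]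

theorem foldl_min_le (vs : List Int) : ∀ (m : Int), vs.foldl min m ≤ m := by
  induction vs with
  | nil => intro m; simp
  | cons v vs ih => intro m; exact le_trans (ih (min m v)) (min_le_left _ _)

theorem foldl_min_le_mem (vs : List Int) : ∀ (m v : Int), v ∈ vs → vs.foldl min m ≤ v := by
  induction vs with
  | nil => intro m v h; cases h
  | cons w vs ih =>
    intro m v h
    rcases List.mem_cons.mp h with h | h
    · subst h; exact le_trans (foldl_min_le vs _) (min_le_right _ _)
    · exact ih _ _ h

theorem foldl_min_mem (vs : List Int) : ∀ (m : Int), vs.foldl min m = m ∨ vs.foldl min m ∈ vs := by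
  induction vs with
  | nil => intro m; left; rfl
  | cons v vs ih =>
    intro m
    rcases ih (min m v) with h | h
    · rw [List.foldl_cons, h]
      rcases min_cases m v with ⟨h', _⟩ | ⟨h', _⟩
      · left; exact h'
      · right; rw [h']; exact List.mem_cons_self
    · right; exact List.mem_cons_of_mem _ h

theorem le_foldl_max (vs : List Int) : ∀ (m : Int), m ≤ vs.foldl max m := by
  induction vs with
  | nil => intro m; simp
  | cons v vs ih => intro m; exact le_trans (le_max_left _ _) (ih (max m v))

theorem mem_le_foldl_max (vs : List Int) : ∀ (m v : Int), v ∈ vs → v ≤ vs.foldl max m := by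
  induction vs with
  | nil => intro m v h; cases h
  | cons w vs ih =>
    intro m v h
    rcases List.mem_cons.mp h with h | h
    · subst h; exact le_trans (le_max_right _ _) (le_foldl_max vs _)
    · exact ih _ _ h

theorem foldl_max_mem (vs : List Int) : ∀ (m : Int), vs.foldl max m = m ∨ vs.foldl max m ∈ vs := by
  induction vs with
  | nil => intro m; left; rfl
  | cons v vs ih =>
    intro m
    rcases ih (max m v) with h | h
    · rw [List.foldl_cons, h]
      rcases max_cases m v with ⟨h', _⟩ | ⟨h', _⟩
      · left; exact h'
      · right; rw [h']; exact List.mem_cons_self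
    · right; exact List.mem_cons_of_mem _ h

-- the column/row extremes characterise the four existentials of A's scan
theorem piMM_spec (vs : List Int) (hv : vs ≠ []) (y : Int) (hy : y ∈ vs) :
    ∃ mn mx, piMM none vs = some (mn, mx) ∧
      ((mn < y) ↔ ∃ v ∈ vs, v < y) ∧ ((y < mx) ↔ ∃ v ∈ vs, y < v) := by
  cases vs with
  | nil => exact absurd rfl hv
  | cons v vs =>
    refine ⟨(vs.foldl min v), (vs.foldl max v), ?_, ?_, ?_⟩
    · rw [piMM, piMM_some]
    · constructor
      · intro h
        rcases foldl_min_mem vs v with h' | h'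
        · exact ⟨v, List.mem_cons_self, h' ▸ h⟩
        · exact ⟨_, List.mem_cons_of_mem _ h', h⟩
      · rintro ⟨w, hw, hwy⟩
        rcases List.mem_cons.mp hw with h | h
        · exact lt_of_le_of_lt (h ▸ foldl_min_le vs v) hwy
        · exact lt_of_le_of_lt (foldl_min_le_mem vs v w h) hwy
    · constructor
      · intro h
        rcases foldl_max_mem vs v with h' | h'
        · exact ⟨v, List.mem_cons_self, h' ▸ h⟩
        · exact ⟨_, List.mem_cons_of_mem _ h', h⟩
      · rintro ⟨w, hw, hwy⟩
        rcases List.mem_cons.mp hw with h | h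
        · exact lt_of_lt_of_le hwy (h ▸ le_foldl_max vs v)
        · exact lt_of_lt_of_le hwy (mem_le_foldl_max vs v w h)

-- any over set(points) = any over points
theorem any_ofList (points : List (Int × Int)) (f : Int × Int → Bool) :
    (PySem.Set.ofList points).any f = points.any f := by
  rw [Bool.eq_iff_iff, List.any_eq_true, List.any_eq_true]
  constructor
  · rintro ⟨p, hp, hf⟩; rw [PySem.Set.mem_ofList] at hp; exact ⟨p, hp, hf⟩
  · rintro ⟨p, hp, hf⟩; rw [← PySem.Set.mem_ofList] at hp; exact ⟨p, hp, hf⟩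

-- ===== VERDICT (by name: the statement is the Claim_ definition above) =====
theorem remove_interior_points_spec : Claim_equal_remove_interior_points := by
  intro points _
  unfold Spec_remove_interior_points
  unfold remove_interior_points remove_interior_points_alt
  rw [piFold_pair]
  apply List.filter_congr
  intro p hp
  obtain ⟨x, y⟩ := p
  rw [piIsInterior_eq x y _ false false false false rfl]
  simp only [Bool.false_or]
  rw [any_ofList, any_ofList, any_ofList, any_ofList]
  rw [piFold_get (fun p => p.1) (fun p => p.2), piFold_get (fun p => p.2) (fun p => p.1)]
  have hycol : y ∈ (points.filter (fun q => q.1 == x)).map (fun q => q.2) :=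
    List.mem_map.mpr ⟨(x, y), List.mem_filter.mpr ⟨hp, by simp⟩, rfl⟩
  have hxrow : x ∈ (points.filter (fun q => q.2 == y)).map (fun q => q.1) :=
    List.mem_map.mpr ⟨(x, y), List.mem_filter.mpr ⟨hp, by simp⟩, rfl⟩
  obtain ⟨cmn, cmx, hcol, hcl, hcg⟩ :=
    piMM_spec _ (List.ne_nil_of_mem hycol) y hycol
  obtain ⟨rmn, rmx, hrow, hrl, hrg⟩ :=
    piMM_spec _ (List.ne_nil_of_mem hxrow) x hxrow
  have hex : (PySem.Dict.empty : PySem.Dict Int (Int × Int)).get? x = none := rfl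
  have hey : (PySem.Dict.empty : PySem.Dict Int (Int × Int)).get? y = none := rfl
  simp only [hex, hey, hcol, hrow]
  congr 1
  rw [Bool.eq_iff_iff]
  simp only [Bool.and_eq_true, List.any_eq_true, piCA, piCB, piCL, piCR,
    beq_iff_eq, decide_eq_true_eq]
  constructor
  · rintro ⟨⟨⟨⟨q1, hq1m, hq1x, hq1y⟩, ⟨q2, hq2m, hq2x, hq2y⟩⟩, ⟨q3, hq3m, hq3y, hq3x⟩⟩,
      ⟨q4, hq4m, hq4y, hq4x⟩⟩
    refine ⟨⟨⟨?_, ?_⟩, ?_⟩, ?_⟩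
    · exact hcl.mpr ⟨q2.2, List.mem_map.mpr ⟨q2, List.mem_filter.mpr ⟨hq2m, by simp [hq2x]⟩, rfl⟩, hq2y⟩
    · exact hcg.mpr ⟨q1.2, List.mem_map.mpr ⟨q1, List.mem_filter.mpr ⟨hq1m, by simp [hq1x]⟩, rfl⟩, hq1y⟩
    · exact hrl.mpr ⟨q3.1, List.mem_map.mpr ⟨q3, List.mem_filter.mpr ⟨hq3m, by simp [hq3y]⟩, rfl⟩, hq3x⟩
    · exact hrg.mpr ⟨q4.1, List.mem_map.mpr ⟨q4, List.mem_filter.mpr ⟨hq4m, by simp [hq4y]⟩, rfl⟩, hq4x⟩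
  · rintro ⟨⟨⟨h1, h2⟩, h3⟩, h4⟩
    obtain ⟨v1, hv1m, hv1⟩ := hcl.mp h1
    obtain ⟨q1, hq1f, hq1v⟩ := List.mem_map.mp hv1m
    obtain ⟨hq1m, hq1x⟩ := List.mem_filter.mp hq1f
    obtain ⟨v2, hv2m, hv2⟩ := hcg.mp h2
    obtain ⟨q2, hq2f, hq2v⟩ := List.mem_map.mp hv2m
    obtain ⟨hq2m, hq2x⟩ := List.mem_filter.mp hq2f
    obtain ⟨v3, hv3m, hv3⟩ := hrl.mp h3
    obtain ⟨q3, hq3f, hq3v⟩ := List.mem_map.mp hv3m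
    obtain ⟨hq3m, hq3y⟩ := List.mem_filter.mp hq3f
    obtain ⟨v4, hv4m, hv4⟩ := hrg.mp h4
    obtain ⟨q4, hq4f, hq4v⟩ := List.mem_map.mp hv4m
    obtain ⟨hq4m, hq4y⟩ := List.mem_filter.mp hq4f
    exact ⟨⟨⟨⟨q2, hq2m, by simpa using hq2x, hq2v ▸ hv2⟩,
              ⟨q1, hq1m, by simpa using hq1x, hq1v ▸ hv1⟩⟩,
             ⟨q3, hq3m, by simpa using hq3y, hq3v ▸ hv3⟩⟩,
           ⟨q4, hq4m, by simpa using hq4y, hq4v ▸ hv4⟩⟩
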